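-- pv_equiv track=rewrite | github.com/k-harada/AtCoder | ABC/ABC243/D.py | solve
-- ===== SOURCE A (Python) =====
-- def solve(n, x, s):
--     lr_list = []
--     d_minus = 0
--     res = x
--
--     for i in range(n):
--         if s[i] == "L":
--             lr_list.append(0)
--         elif s[i] == "R":
--             lr_list.append(1)
--         else:
--             if len(lr_list) > 0:
--                 _ = lr_list.pop()
--             else:
--                 d_minus += 1
--
--     for _ in range(d_minus):
--         res = res // 2
--
--     for c in lr_list:
--         res = res * 2 + c
--
--     return res
-- ===== SOURCE B (Python) =====
-- def solve(n, x, s):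
--     res = x
--     for i in range(n):
--         c = s[i]
--         if c == "L":
--             res = res * 2
--         elif c == "R":
--             res = res * 2 + 1
--         else:
--             res = res // 2
--     return res
-- ===== Notes on version B (the rewrite author's own statement) =====
-- stated objective: simpler
-- what changed: Single direct pass keeping only the current node number (L: *2, R: *2+1, else //2), instead of A's stack of deferred L/R moves with pop-based cancellation, a separate d_minus counter and two final reapply loops; correct because //2 exactly undoes a preceding *2 or *2+1, and constant-factor faster by dropping the list appends/pops and extra passes.
import Mathlib
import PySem

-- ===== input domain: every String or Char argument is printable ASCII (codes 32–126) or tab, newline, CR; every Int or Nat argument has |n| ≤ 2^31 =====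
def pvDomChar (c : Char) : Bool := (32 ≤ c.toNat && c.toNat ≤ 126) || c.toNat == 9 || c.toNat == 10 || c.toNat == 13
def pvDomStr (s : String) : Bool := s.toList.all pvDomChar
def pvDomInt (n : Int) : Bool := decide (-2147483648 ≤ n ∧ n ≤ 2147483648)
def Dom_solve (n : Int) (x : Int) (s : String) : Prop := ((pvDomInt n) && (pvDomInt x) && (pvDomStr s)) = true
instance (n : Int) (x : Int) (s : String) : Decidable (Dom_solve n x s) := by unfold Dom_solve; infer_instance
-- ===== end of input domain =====

-- B replaces A's stack of deferred L/R moves + d_minus counter + two reapply loops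
-- by one direct pass that keeps only the current node number (simpler, same O(n)).

-- ===== PORT A =====
def solve (n : Int) (x : Int) (s : String) : Int :=
  let st := (PySem.List.pyRange 0 n 1).foldl
    (fun (st : List Int × Int) i =>
      let c := PySem.List.pyGetD s.toList i ' '
      if c = 'L' then (st.1 ++ [(0 : Int)], st.2)
      else if c = 'R' then (st.1 ++ [(1 : Int)], st.2)
      else if st.1.length > 0 then (st.1.dropLast, st.2)
      else (st.1, st.2 + 1)) ([], (0 : Int))
  let res := (PySem.List.pyRange 0 st.2 1).foldl (fun r _ => PySem.Int.floordiv r 2) x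
  st.1.foldl (fun r c => r * 2 + c) res

-- ===== PORT B =====
def solve_alt (n : Int) (x : Int) (s : String) : Int :=
  (PySem.List.pyRange 0 n 1).foldl
    (fun r i =>
      let c := PySem.List.pyGetD s.toList i ' '
      if c = 'L' then r * 2
      else if c = 'R' then r * 2 + 1
      else PySem.Int.floordiv r 2) x

-- ===== PRECONDITION & SPEC =====
-- A indexes s[i] for i in range(n): it raises IndexError exactly when n > len(s).
def Pre_solve (n : Int) (x : Int) (s : String) : Prop := n ≤ (s.toList.length : Int)
instance (n : Int) (x : Int) (s : String) : Decidable (Pre_solve n x s) := by unfold Pre_solve; infer_instance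
def pvWitness_solve : Int × Int × String := (4, 5, "LRUL")

def Spec_solve (n : Int) (x : Int) (s : String) (out : Int) : Prop := out = solve_alt n x s
instance (n : Int) (x : Int) (s : String) (out : Int) : Decidable (Spec_solve n x s out) := by unfold Spec_solve; infer_instance

-- ===== CLAIM (what is proved, stated in full; the proofs are below) =====
def Claim_equal_solve : Prop := ∀ (n : Int) (x : Int) (s : String), Dom_solve n x s → Pre_solve n x s → Spec_solve n x s (solve n x s)

-- ===== LEMMAS AND PROOFS =====

-- A's step on a character (state = (lr_list, d_minus))
def stepA (st : List Int × Int) (c : Char) : List Int × Int :=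
  if c = 'L' then (st.1 ++ [(0 : Int)], st.2)
  else if c = 'R' then (st.1 ++ [(1 : Int)], st.2)
  else if st.1.length > 0 then (st.1.dropLast, st.2)
  else (st.1, st.2 + 1)

-- B's step on a character
def stepB (r : Int) (c : Char) : Int :=
  if c = 'L' then r * 2
  else if c = 'R' then r * 2 + 1
  else PySem.Int.floordiv r 2

-- A's final value from a state
def halves (d : Int) (x : Int) : Int :=
  (PySem.List.pyRange 0 d 1).foldl (fun r _ => PySem.Int.floordiv r 2) x

def finishA (st : List Int × Int) (x : Int) : Int :=
  st.1.foldl (fun r c => r * 2 + c) (halves st.2 x)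

lemma halves_succ (d : Int) (x : Int) (hd : 0 ≤ d) :
    halves (d + 1) x = PySem.Int.floordiv (halves d x) 2 := by
  unfold halves
  rw [PySem.List.pyRange_one_succ_right hd, List.foldl_append]
  rfl

lemma floordiv_double (r c : Int) (hc : c = 0 ∨ c = 1) :
    PySem.Int.floordiv (r * 2 + c) 2 = r := by
  rw [PySem.Int.floordiv_eq_iff_of_pos (hb := by omega)]
  omega

lemma foldl_range_getD {β : Type} (f : β → Char → β) (xs : List Char) (n : Int)
    (h : n ≤ (xs.length : Int)) (init : β) :
    (PySem.List.pyRange 0 n 1).foldl (fun acc j => f acc (PySem.List.pyGetD xs j ' ')) init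
      = (xs.take n.toNat).foldl f init := by
  by_cases hn : n ≤ 0
  · rw [PySem.List.pyRange_one_eq_nil hn]
    have : n.toNat = 0 := by omega
    simp [this]
  · replace hn : 0 < n := by omega
    obtain ⟨m, hm⟩ : ∃ m : Nat, n = (m : Int) := ⟨n.toNat, by omega⟩
    subst hm
    have hlen : m ≤ xs.length := by exact_mod_cast h
    clear h hn
    induction m generalizing init with
    | zero => simp [PySem.List.pyRange_one_eq_nil]
    | succ k ih =>
      have hk : (0 : Int) ≤ (k : Int) := by positivity
      have hkl : k < xs.length := by omega
      rw [show ((k + 1 : Nat) : Int) = (k : Int) + 1 by push_cast; ring,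
        PySem.List.pyRange_one_succ_right hk, List.foldl_append,
        ih init (by omega)]
      have htake : xs.take (((k : Int) + 1).toNat) = xs.take k ++ [xs[k]] := by
        have : ((k : Int) + 1).toNat = k + 1 := by omega
        rw [this, List.take_add_one, List.getElem?_eq_getElem hkl]
        rfl
      rw [htake, List.foldl_append]
      simp [PySem.List.pyGetD_natCast, List.getD, List.getElem?_eq_getElem hkl]

lemma finishA_invariant (cs : List Char) (x : Int) :
    ∀ (lr : List Int) (d : Int), (∀ c ∈ lr, c = 0 ∨ c = 1) → 0 ≤ d →
      cs.foldl stepB (finishA (lr, d) x) = finishA (cs.foldl stepA (lr, d)) x := by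
  induction cs with
  | nil => intro lr d _ _; rfl
  | cons c cs ih =>
    intro lr d hlr hd
    simp only [List.foldl_cons]
    by_cases hL : c = 'L'
    · have hB : stepB (finishA (lr, d) x) c = finishA (lr ++ [0], d) x := by
        simp [stepB, finishA, hL, List.foldl_append]
      have hA : stepA (lr, d) c = (lr ++ [0], d) := by simp [stepA, hL]
      rw [hB, hA]
      refine ih (lr ++ [0]) d ?_ hd
      intro a ha
      rcases List.mem_append.1 ha with h | h
      · exact hlr a h
      · exact Or.inl (by simpa using h)
    · by_cases hR : c = 'R'
      · have hB : stepB (finishA (lr, d) x) c = finishA (lr ++ [1], d) x := by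
          simp [stepB, finishA, hR, List.foldl_append]
        have hA : stepA (lr, d) c = (lr ++ [1], d) := by simp [stepA, hR]
        rw [hB, hA]
        refine ih (lr ++ [1]) d ?_ hd
        intro a ha
        rcases List.mem_append.1 ha with h | h
        · exact hlr a h
        · exact Or.inr (by simpa using h)
      · rcases eq_or_ne lr [] with hnil | hne
        · have hB : stepB (finishA (lr, d) x) c = finishA (lr, d + 1) x := by
            simp only [stepB, hL, hR, if_false, finishA, hnil, List.foldl_nil]
            exact (halves_succ d x hd).symm
          have hA : stepA (lr, d) c = (lr, d + 1) := by simp [stepA, hL, hR, hnil]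
          rw [hB, hA]
          exact ih lr (d + 1) hlr (by omega)
        · have hlast := List.dropLast_append_getLast hne
          have hB : stepB (finishA (lr, d) x) c = finishA (lr.dropLast, d) x := by
            simp only [stepB, hL, hR, if_false, finishA]
            conv_lhs => rw [← hlast, List.foldl_append]
            simp only [List.foldl_cons, List.foldl_nil]
            exact floordiv_double _ _ (hlr _ (List.getLast_mem hne))
          have hA : stepA (lr, d) c = (lr.dropLast, d) := by
            have : lr.length > 0 := List.length_pos_of_ne_nil hne
            simp [stepA, hL, hR, this]
          rw [hB, hA]
          exact ih lr.dropLast d (fun a ha => hlr a (List.dropLast_subset _ ha)) hd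

-- ===== VERDICT (by name: the statement is the Claim_ definition above) =====
theorem solve_spec : Claim_equal_solve := by
  intro n x s _ hpre
  unfold Spec_solve
  show finishA ((PySem.List.pyRange 0 n 1).foldl
      (fun acc j => stepA acc (PySem.List.pyGetD s.toList j ' ')) ([], 0)) x
    = (PySem.List.pyRange 0 n 1).foldl
      (fun acc j => stepB acc (PySem.List.pyGetD s.toList j ' ')) x
  rw [foldl_range_getD stepA s.toList n hpre ([], 0),
      foldl_range_getD stepB s.toList n hpre x]
  have := (finishA_invariant (s.toList.take n.toNat) x [] 0 (by simp) le_rfl).symm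
  simpa [finishA, halves, PySem.List.pyRange_one_eq_nil] using this
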